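-- pv_equiv track=rewrite | github.com/RenzoGior/uba.estudios | Algoritmo1/ejercicios/ejercicios_6/ejercicio_6_3.py | remplazar_espacios
-- ===== SOURCE A (Python) =====
-- def remplazar_espacios(s: str, n: int) -> str:
--     espacio = " "
--     cadena = ""
--     contador = 0
--     for i in s:
--         if espacio == i and contador < n:
--             cadena += "_"
--             contador += 1
--         else:
--             cadena += i
--
--     return cadena
-- ===== SOURCE B (Python) =====
-- def remplazar_espacios(s: str, n: int) -> str:
--     return "_".join(s.split(" ", max(n, 0)))
-- ===== Notes on version B (the rewrite author's own statement) =====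
-- stated objective: idiomatic
-- what changed: A's explicit character-by-character loop with an underscore counter is replaced by the one-liner '_'.join(s.split(' ', max(n, 0))): split on at most max(n,0) spaces and rejoin with underscores.
import Mathlib
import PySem

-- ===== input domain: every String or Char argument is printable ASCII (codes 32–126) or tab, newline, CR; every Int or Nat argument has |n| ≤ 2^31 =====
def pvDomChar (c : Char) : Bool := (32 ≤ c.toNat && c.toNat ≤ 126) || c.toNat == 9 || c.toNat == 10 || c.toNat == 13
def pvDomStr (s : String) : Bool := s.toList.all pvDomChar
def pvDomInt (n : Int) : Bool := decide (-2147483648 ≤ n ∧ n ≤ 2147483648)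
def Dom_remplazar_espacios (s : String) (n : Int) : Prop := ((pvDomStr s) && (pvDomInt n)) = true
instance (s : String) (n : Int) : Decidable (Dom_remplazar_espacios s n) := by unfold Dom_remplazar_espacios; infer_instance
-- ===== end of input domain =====

-- B replaces A's char-by-char counting loop with "_".join(s.split(" ", max(n, 0))); agreement on the return value is proved for all inputs.

-- ===== PORT A =====
-- A: loop over the characters, replacing a space by '_' while contador < n.
-- (the string accumulator is kept as a List Char; Lean's String.append is opaque to the kernel)
def remplazar_espacios (s : String) (n : Int) : String :=
  let r := s.toList.foldl
    (fun (st : List Char × Int) i =>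
      if ' ' = i ∧ st.2 < n then (st.1 ++ ['_'], st.2 + 1) else (st.1 ++ [i], st.2))
    ([], 0)
  String.ofList r.1

-- ===== PORT B =====
-- B: "_".join(s.split(" ", max(n, 0)))
def remplazar_espacios_alt (s : String) (n : Int) : String :=
  String.ofList (PySem.Chars.join ['_'] (PySem.Chars.splitOnMax s.toList [' '] (max n 0)))

-- ===== PRECONDITION & SPEC =====
def Spec_remplazar_espacios (s : String) (n : Int) (out : String) : Prop := out = remplazar_espacios_alt s n
instance (s : String) (n : Int) (out : String) : Decidable (Spec_remplazar_espacios s n out) := by unfold Spec_remplazar_espacios; infer_instance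

-- ===== CLAIM (what is proved, stated in full; the proofs are below) =====
def Claim_equal_remplazar_espacios : Prop := ∀ (s : String) (n : Int), Dom_remplazar_espacios s n → Spec_remplazar_espacios s n (remplazar_espacios s n)

-- ===== LEMMAS AND PROOFS =====

-- canonical form: replace the first m spaces of l by underscores
def pvLoopN : List Char → Nat → List Char
  | [], _ => []
  | c :: cs, m => if c = ' ' ∧ 0 < m then '_' :: pvLoopN cs (m - 1) else c :: pvLoopN cs m

-- A's loop with an Int counter, threshold n
def pvLoopI (n : Int) : List Char → Int → List Char
  | [], _ => []
  | c :: cs, k => if ' ' = c ∧ k < n then '_' :: pvLoopI n cs (k + 1) else c :: pvLoopI n cs k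

theorem pvFoldl_eq_loopI (n : Int) (l : List Char) (acc : List Char) (k : Int) :
    (l.foldl
      (fun (st : List Char × Int) i =>
        if ' ' = i ∧ st.2 < n then (st.1 ++ ['_'], st.2 + 1) else (st.1 ++ [i], st.2))
      (acc, k)).1 = acc ++ pvLoopI n l k := by
  induction l generalizing acc k with
  | nil => simp [pvLoopI]
  | cons c cs ih =>
    simp only [List.foldl_cons, pvLoopI]
    by_cases h : ' ' = c ∧ k < n
    · rw [if_pos h, if_pos h, ih]; simp
    · rw [if_neg h, if_neg h, ih]; simp

theorem pvLoopI_eq_loopN (n : Int) (l : List Char) (k : Int) :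
    pvLoopI n l k = pvLoopN l (n - k).toNat := by
  induction l generalizing k with
  | nil => simp [pvLoopI, pvLoopN]
  | cons c cs ih =>
    simp only [pvLoopI, pvLoopN]
    by_cases h : ' ' = c ∧ k < n
    · have hc : c = ' ' ∧ 0 < (n - k).toNat := ⟨h.1.symm, by omega⟩
      have hm : (n - (k + 1)).toNat = (n - k).toNat - 1 := by omega
      simp [h, hc, ih, hm]
    · have hc : ¬ (c = ' ' ∧ 0 < (n - k).toNat) := by
        intro ⟨h1, h2⟩; exact h ⟨h1.symm, by omega⟩
      rw [if_neg h, if_neg hc, ih]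

theorem pvLoopN_zero (l : List Char) : pvLoopN l 0 = l := by
  induction l with
  | nil => rfl
  | cons c cs ih => simp [pvLoopN, ih]

theorem pvJoinSnoc (l : List (List Char)) (y : List Char) :
    PySem.Chars.join ['_'] (l ++ [y])
      = if l = [] then y else PySem.Chars.join ['_'] l ++ ['_'] ++ y := by
  induction l with
  | nil => simp [PySem.Chars.join_singleton]
  | cons a t ih =>
    cases t with
    | nil => simp [PySem.Chars.join_cons_cons, PySem.Chars.join_singleton]
    | cons b t' =>
      simp only [List.cons_append] at ih ⊢
      rw [PySem.Chars.join_cons_cons, ih]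
      simp [PySem.Chars.join_cons_cons, List.append_assoc]

theorem pvGo_join (fuel : Nat) (l : List Char) (m : Nat) (cur : List Char)
    (acc : List (List Char)) (hf : l.length < fuel) :
    PySem.Chars.join ['_'] (PySem.Chars.splitOnMax.go [' '] fuel m l cur acc)
      = PySem.Chars.join ['_'] (acc.reverse ++ [cur.reverse]) ++ pvLoopN l m := by
  induction fuel generalizing l m cur acc with
  | zero => omega
  | succ fuel ih =>
    cases l with
    | nil =>
      rw [PySem.Chars.splitOnMax.go.eq_def]
      simp [pvLoopN]
    | cons c rest =>
      rw [PySem.Chars.splitOnMax.go.eq_def]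
      simp only [List.length_cons] at hf
      by_cases hm : m = 0
      · subst hm
        simp only [reduceIte, pvLoopN_zero]
        rw [List.reverse_cons, pvJoinSnoc, pvJoinSnoc]
        by_cases ha : acc.reverse = [] <;> simp [ha, List.append_assoc]
      · by_cases hc : c = ' '
        · subst hc
          have hpre : List.isPrefixOf [' '] (' ' :: rest) = true := by
            simp [List.isPrefixOf]
          simp only [if_neg hm, if_pos hpre]
          rw [ih _ _ _ _ (by simpa using Nat.lt_of_succ_lt_succ (Nat.succ_lt_succ_iff.mp (by omega)))]
          simp only [pvLoopN, List.reverse_nil, List.reverse_cons, List.length_cons,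
            List.length_nil, List.drop_succ_cons, List.drop_zero]
          rw [if_pos (And.intro trivial (Nat.pos_of_ne_zero hm))]
          rw [pvJoinSnoc, if_neg (by simp), pvJoinSnoc]
          by_cases ha : acc.reverse = [] <;> simp [ha, List.append_assoc]
        · have hpre : List.isPrefixOf [' '] (c :: rest) = false := by
            simp [List.isPrefixOf]; exact fun h => hc h.symm
          simp only [if_neg hm, hpre, Bool.false_eq_true, if_false]
          rw [ih _ _ _ _ (by omega)]
          simp only [pvLoopN, List.reverse_cons]
          rw [if_neg (by exact fun h => hc h.1)]
          rw [pvJoinSnoc, pvJoinSnoc]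
          by_cases ha : acc.reverse = [] <;> simp [ha, List.append_assoc]

-- ===== VERDICT (by name: the statement is the Claim_ definition above) =====
theorem remplazar_espacios_spec : Claim_equal_remplazar_espacios := by
  intro s n _
  unfold Spec_remplazar_espacios remplazar_espacios remplazar_espacios_alt
  simp only []
  rw [pvFoldl_eq_loopI, pvLoopI_eq_loopN]
  have hmax : ¬ (max n 0 < 0) := by omega
  rw [PySem.Chars.splitOnMax, if_neg hmax]
  rw [pvGo_join _ _ _ _ _ (Nat.lt_succ_self _)]
  have : (max n 0).toNat = (n - 0).toNat := by omega
  simp [PySem.Chars.join_singleton, this]
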